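-- pv_equiv track=rewrite | github.com/sethirus/The-Thiele-Machine | attempt.py | parity3_cnf
-- ===== SOURCE A (Python) =====
-- def parity3_cnf(x1, x2, x3, rhs):
--     """
--     Returns CNF clauses for x1 XOR x2 XOR x3 == rhs (rhs in {0,1}).
--
--     This is the blind solver's favorite gadget. It encodes parity constraints
--     in a way that a resolution-based solver can (try to) understand. If you
--     ever wondered how to make a Turing Machine sweat, this is it.
--
--     Args:
--         x1, x2, x3 (int): Variable indices.
--         rhs (int): Right-hand side, 0 or 1.
--
--     Returns:
--         list: List of CNF clauses.
--     """
--     clauses = []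
--     for a in [0,1]:
--         for b in [0,1]:
--             for c in [0,1]:
--                 if (a ^ b ^ c) == rhs:
--                     clause = []
--                     clause.append(x1 if a else -x1)
--                     clause.append(x2 if b else -x2)
--                     clause.append(x3 if c else -x3)
--                     clauses.append(clause)
--     return clauses
-- ===== SOURCE B (Python) =====
-- def parity3_cnf(x1, x2, x3, rhs):
--     """CNF clauses for x1 XOR x2 XOR x3 == rhs as a closed-form table.
--
--     Only two parity constraints over three variables exist, so the four
--     clauses for each are written out directly; for rhs outside {0,1} no
--     sign combination has that parity, so there are no clauses.
--     """
--     if rhs == 0: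
--         return [[-x1, -x2, -x3], [-x1, x2, x3], [x1, -x2, x3], [x1, x2, -x3]]
--     if rhs == 1:
--         return [[-x1, -x2, x3], [-x1, x2, -x3], [x1, -x2, -x3], [x1, x2, x3]]
--     return []
-- ===== Notes on version B (the rewrite author's own statement) =====
-- stated objective: simpler
-- what changed: Replaces the 8-way enumerate-and-filter loop nest with a closed-form table: the four clauses for rhs=0 and rhs=1 are written out literally (and [] otherwise), eliminating all loops and the parity test.
import Mathlib
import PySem

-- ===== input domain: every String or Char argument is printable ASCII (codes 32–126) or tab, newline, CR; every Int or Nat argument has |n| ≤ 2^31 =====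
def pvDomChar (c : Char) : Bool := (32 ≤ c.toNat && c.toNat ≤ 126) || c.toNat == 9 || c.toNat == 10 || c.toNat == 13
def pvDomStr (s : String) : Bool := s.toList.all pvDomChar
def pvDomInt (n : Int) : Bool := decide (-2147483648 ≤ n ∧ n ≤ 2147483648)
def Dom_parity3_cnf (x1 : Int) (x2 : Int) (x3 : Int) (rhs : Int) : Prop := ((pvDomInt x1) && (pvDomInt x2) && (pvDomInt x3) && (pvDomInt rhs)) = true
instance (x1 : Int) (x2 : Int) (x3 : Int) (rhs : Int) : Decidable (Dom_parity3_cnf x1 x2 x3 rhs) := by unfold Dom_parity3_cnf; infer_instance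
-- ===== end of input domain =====

-- B replaces A's enumerate-and-filter loop nest by a closed-form table of the four
-- clauses for rhs = 0 and rhs = 1 (and [] otherwise); objective: simpler.


-- ===== PORT A =====
-- literal triple loop over a, b, c in [0,1] with the parity filter
def parity3_cnf (x1 : Int) (x2 : Int) (x3 : Int) (rhs : Int) : List (List Int) :=
  ([0, 1] : List Int).foldl (fun clauses a =>
    ([0, 1] : List Int).foldl (fun clauses b =>
      ([0, 1] : List Int).foldl (fun clauses c =>
        if (PySem.Int.bxor (PySem.Int.bxor a b) c) = rhs then
          clauses ++ [[if a ≠ 0 then x1 else -x1,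
                       if b ≠ 0 then x2 else -x2,
                       if c ≠ 0 then x3 else -x3]]
        else clauses) clauses) clauses) []

-- ===== PORT B =====
-- closed-form table: the four clauses for each parity, no loops
def parity3_cnf_alt (x1 : Int) (x2 : Int) (x3 : Int) (rhs : Int) : List (List Int) :=
  if rhs = 0 then
    [[-x1, -x2, -x3], [-x1, x2, x3], [x1, -x2, x3], [x1, x2, -x3]]
  else if rhs = 1 then
    [[-x1, -x2, x3], [-x1, x2, -x3], [x1, -x2, -x3], [x1, x2, x3]]
  else []

-- ===== PRECONDITION & SPEC =====
def Spec_parity3_cnf (x1 : Int) (x2 : Int) (x3 : Int) (rhs : Int) (out : List (List Int)) : Prop := out = parity3_cnf_alt x1 x2 x3 rhs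
instance (x1 : Int) (x2 : Int) (x3 : Int) (rhs : Int) (out : List (List Int)) : Decidable (Spec_parity3_cnf x1 x2 x3 rhs out) := by unfold Spec_parity3_cnf; infer_instance

-- ===== CLAIM (what is proved, stated in full; the proofs are below) =====
def Claim_equal_parity3_cnf : Prop := ∀ (x1 : Int) (x2 : Int) (x3 : Int) (rhs : Int), Dom_parity3_cnf x1 x2 x3 rhs → Spec_parity3_cnf x1 x2 x3 rhs (parity3_cnf x1 x2 x3 rhs)

-- ===== LEMMAS AND PROOFS =====

-- ===== VERDICT (by name: the statement is the Claim_ definition above) =====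
theorem parity3_cnf_spec : Claim_equal_parity3_cnf := by
  intro x1 x2 x3 rhs _
  unfold Spec_parity3_cnf parity3_cnf parity3_cnf_alt
  have e01 : PySem.Int.bxor 0 1 = (1:Int) := by decide
  have e10 : PySem.Int.bxor 1 0 = (1:Int) := by decide
  have e11 : PySem.Int.bxor 1 1 = (0:Int) := by decide
  by_cases h0 : rhs = 0
  · subst h0; norm_num [List.foldl, e01, e10, e11]
  · by_cases h1 : rhs = 1
    · subst h1; norm_num [List.foldl, e01, e10, e11]
    · have h0' : ¬ (0 : Int) = rhs := fun h => h0 h.symm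
      have h1' : ¬ (1 : Int) = rhs := fun h => h1 h.symm
      simp only [List.foldl]
      norm_num [e01, e10, e11, h0, h1, h0', h1']
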